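-- pv_equiv track=rewrite | github.com/satojkovic/algorithms | atcoder/abc437/problem_c.py | solution
-- ===== SOURCE A (Python) =====
-- def solution(N, Ws, Ps):
--     def backtrack(n, current):
--         if tuple(current) in memo:
--             return
--         if n == N:
--             if current[1] <= current[2]:
--                 res.append(current)
--             return
--         backtrack(n + 1, list(map(lambda x, y: x + y, current, [1, Ws[n], 0])))
--         backtrack(n + 1, list(map(lambda x, y: x + y, current, [0, 0, Ps[n]])))
--         memo[tuple(current)] = res
--
--     memo = {}
--     res = []
--     current = [0, 0, 0] # [num_of_dogs, sum_of_w, sum_of_p]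
--     backtrack(0, current)
--     ans_idx = 0
--     for i in range(len(res)):
--         if res[i][0] > res[ans_idx][0]:
--             ans_idx = i
--     return res[ans_idx][0]
-- ===== SOURCE B (Python) =====
-- def solution(N, Ws, Ps):
--     # Same memoized depth-first search as A (so its pruning behaviour is
--     # reproduced exactly), but iterative with an explicit stack of
--     # ("expand"/"finish") frames, a plain set of finished states instead of a
--     # dict mapping states to the result list, and a list of feasible dog-counts
--     # reduced by max() instead of materialized triples plus an argmax scan.
--     seen = set()
--     counts = []
--     stack = [("expand", 0, (0, 0, 0))]
--     while stack:
--         tag, n, cur = stack.pop()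
--         if tag == "finish":
--             seen.add(cur)
--             continue
--         if cur in seen:
--             continue
--         if n == N:
--             if cur[1] <= cur[2]:
--                 counts.append(cur[0])
--             continue
--         stack.append(("finish", n, cur))
--         stack.append(("expand", n + 1, (cur[0], cur[1], cur[2] + Ps[n])))
--         stack.append(("expand", n + 1, (cur[0] + 1, cur[1] + Ws[n], cur[2])))
--     return max(counts)
-- ===== Notes on version B (the rewrite author's own statement) =====
-- stated objective: alternative
-- what changed: Same memoized search semantics (so A's exact results, including its depth-blind pruning, are reproduced), but iterative with an explicit stack of expand/finish frames instead of recursion, a plain set of finished states instead of A's dict mapping states to the shared result list, and a list of feasible dog-counts reduced by max() instead of materializing [count,sumW,sumP] triples and an argmax index scan; as a side benefit B cannot hit Python's recursion limit.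
import Mathlib
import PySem

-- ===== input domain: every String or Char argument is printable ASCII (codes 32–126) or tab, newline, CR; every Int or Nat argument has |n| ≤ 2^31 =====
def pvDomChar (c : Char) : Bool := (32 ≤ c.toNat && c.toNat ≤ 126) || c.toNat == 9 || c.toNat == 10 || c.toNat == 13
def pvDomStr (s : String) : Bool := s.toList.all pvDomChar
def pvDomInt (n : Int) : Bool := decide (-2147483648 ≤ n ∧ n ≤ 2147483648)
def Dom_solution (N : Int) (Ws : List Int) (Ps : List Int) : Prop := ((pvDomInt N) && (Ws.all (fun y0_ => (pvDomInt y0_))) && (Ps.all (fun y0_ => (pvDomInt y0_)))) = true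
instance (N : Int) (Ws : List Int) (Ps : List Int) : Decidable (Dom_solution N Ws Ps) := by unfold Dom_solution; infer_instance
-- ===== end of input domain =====

-- B keeps A's memoized-search semantics exactly but is iterative: an explicit stack of
-- expand/finish frames, a set of finished states instead of A's dict, and a running list
-- of feasible dog-counts reduced by max() instead of result triples plus an argmax scan.

-- ===== PORT A =====
-- transliteration of A's recursive `backtrack` (the fuel `N - n`, pattern-matched via the
-- remaining-depth argument, is only a totality guard; it is never exhausted when 0 ≤ N)
def solBtA (N : Int) (Ws Ps : List Int) :
    Nat → Int → (Int × Int × Int) →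
    PySem.Dict (Int × Int × Int) (List (Int × Int × Int)) → List (Int × Int × Int) →
    PySem.Dict (Int × Int × Int) (List (Int × Int × Int)) × List (Int × Int × Int)
  | fuel, n, cur, memo, res =>
    if (memo.get? cur).isSome then (memo, res)
    else if n = N then (memo, if cur.2.1 ≤ cur.2.2 then res ++ [cur] else res)
    else
      match fuel with
      | 0 => (memo, res)
      | f + 1 =>
        let w := (PySem.List.pyGet? Ws n).getD 0
        let p := (PySem.List.pyGet? Ps n).getD 0
        let r1 := solBtA N Ws Ps f (n + 1) (cur.1 + 1, cur.2.1 + w, cur.2.2) memo res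
        let r2 := solBtA N Ws Ps f (n + 1) (cur.1, cur.2.1, cur.2.2 + p) r1.1 r1.2
        (r2.1.insert cur r2.2, r2.2)

def solution (N : Int) (Ws : List Int) (Ps : List Int) : Int :=
  let res := (solBtA N Ws Ps N.toNat 0 (0, 0, 0) PySem.Dict.empty []).2
  let ansIdx := (List.range res.length).foldl
    (fun ansIdx i => if (res.getD i (0, 0, 0)).1 > (res.getD ansIdx (0, 0, 0)).1 then i else ansIdx) 0
  (res.getD ansIdx (0, 0, 0)).1

-- ===== PORT B =====
-- stack frames of Source B's while-loop; `expand` also carries the remaining depth as the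
-- same totality guard as in port A (never exhausted when 0 ≤ N)
inductive BFrame
  | expand : Nat → Int → Int × Int × Int → BFrame
  | finish : Int × Int × Int → BFrame
deriving DecidableEq, Repr

def bWeight : BFrame → Nat
  | .expand r _ _ => 2 * 3 ^ r
  | .finish _ => 1

def bMeasure (l : List BFrame) : Nat := (l.map bWeight).sum

theorem bMeasure_cons (f : BFrame) (l : List BFrame) :
    bMeasure (f :: l) = bWeight f + bMeasure l := by
  simp [bMeasure]

def solMachB (N : Int) (Ws Ps : List Int) :
    List BFrame → PySem.Set (Int × Int × Int) → List Int →
    PySem.Set (Int × Int × Int) × List Int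
  | [], seen, cnts => (seen, cnts)
  | .finish cur :: rest, seen, cnts => solMachB N Ws Ps rest (PySem.Set.add seen cur) cnts
  | .expand rem n cur :: rest, seen, cnts =>
    if PySem.Set.contains seen cur then solMachB N Ws Ps rest seen cnts
    else if n = N then
      solMachB N Ws Ps rest seen (if cur.2.1 ≤ cur.2.2 then cnts ++ [cur.1] else cnts)
    else
      match rem with
      | 0 => solMachB N Ws Ps rest seen cnts
      | r + 1 =>
        let w := (PySem.List.pyGet? Ws n).getD 0
        let p := (PySem.List.pyGet? Ps n).getD 0
        solMachB N Ws Ps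
          (.expand r (n + 1) (cur.1 + 1, cur.2.1 + w, cur.2.2) ::
           .expand r (n + 1) (cur.1, cur.2.1, cur.2.2 + p) ::
           .finish cur :: rest) seen cnts
termination_by stack _ _ => bMeasure stack
decreasing_by
  all_goals (try (have h3 : 1 ≤ 3 ^ r := Nat.one_le_pow _ _ (by norm_num)))
  all_goals simp [bMeasure_cons, bWeight, pow_succ]
  all_goals omega

def solution_alt (N : Int) (Ws : List Int) (Ps : List Int) : Int :=
  let r := solMachB N Ws Ps [.expand N.toNat 0 (0, 0, 0)] PySem.Set.empty []
  (PySem.List.max? r.2 (fun x => x)).getD 0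

-- ===== PRECONDITION & SPEC =====
-- Pre_ excludes exactly the inputs on which Python A raises IndexError: N outside the
-- range of Ws/Ps, and inputs with no feasible selection, where the result list stays
-- empty and res[ans_idx] fails (Python B likewise raises there, in max([])).
def Pre_solution (N : Int) (Ws : List Int) (Ps : List Int) : Prop :=
  0 ≤ N ∧ N.toNat ≤ Ws.length ∧ N.toNat ≤ Ps.length ∧
  (∃ S ∈ (Finset.range N.toNat).powerset,
      (∑ i ∈ S, Ws.getD i 0) ≤ ∑ i ∈ Finset.range N.toNat \ S, Ps.getD i 0)
instance (N : Int) (Ws : List Int) (Ps : List Int) : Decidable (Pre_solution N Ws Ps) := by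
  unfold Pre_solution; infer_instance

def pvWitness_solution : Int × List Int × List Int := (1, [0], [1])

def Spec_solution (N : Int) (Ws : List Int) (Ps : List Int) (out : Int) : Prop := out = solution_alt N Ws Ps
instance (N : Int) (Ws : List Int) (Ps : List Int) (out : Int) : Decidable (Spec_solution N Ws Ps out) := by unfold Spec_solution; infer_instance

-- ===== CLAIM (what is proved, stated in full; the proofs are below) =====
def Claim_equal_solution : Prop := ∀ (N : Int) (Ws : List Int) (Ps : List Int), Dom_solution N Ws Ps → Pre_solution N Ws Ps → Spec_solution N Ws Ps (solution N Ws Ps)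

-- ===== LEMMAS AND PROOFS =====

-- B's seen-set is exactly the key list of A's memo dict
theorem contains_keys_eq (d : PySem.Dict (Int × Int × Int) (List (Int × Int × Int)))
    (k : Int × Int × Int) :
    PySem.Set.contains d.keys k = (d.get? k).isSome := by
  rw [← PySem.Dict.contains_eq_isSome_get?]
  by_cases h : k ∈ d.keys
  · rw [(PySem.Set.contains_iff _ _).mpr h, (PySem.Dict.contains_iff_mem_keys _ _).mpr h]
  · have h1 : PySem.Set.contains d.keys k = false :=
      Bool.eq_false_iff.mpr (fun hc => h ((PySem.Set.contains_iff _ _).mp hc))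
    have h2 : d.contains k = false :=
      Bool.eq_false_iff.mpr (fun hc => h ((PySem.Dict.contains_iff_mem_keys _ _).mp hc))
    rw [h1, h2]

theorem keys_insert_eq_add (d : PySem.Dict (Int × Int × Int) (List (Int × Int × Int)))
    (k : Int × Int × Int) (v : List (Int × Int × Int)) :
    (d.insert k v).keys = PySem.Set.add d.keys k := by
  rw [PySem.Set.add_eq_ite]
  by_cases h : k ∈ d.keys
  · rw [if_pos h, PySem.Dict.keys_insert_of_contains d v ((PySem.Dict.contains_iff_mem_keys _ _).mpr h)]
  · rw [if_neg h, PySem.Dict.keys_insert_of_not_contains d v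
      (Bool.eq_false_iff.mpr (fun hc => h ((PySem.Dict.contains_iff_mem_keys _ _).mp hc)))]

-- lockstep simulation: expanding one node on B's stack performs exactly A's recursive call
theorem sim_lemma (N : Int) (Ws Ps : List Int) :
    ∀ (fuel : Nat) (n : Int) (cur : Int × Int × Int) (rest : List BFrame)
      (memo : PySem.Dict (Int × Int × Int) (List (Int × Int × Int))) (res : List (Int × Int × Int)),
      solMachB N Ws Ps (.expand fuel n cur :: rest) memo.keys (res.map (·.1)) =
        solMachB N Ws Ps rest (solBtA N Ws Ps fuel n cur memo res).1.keys
          ((solBtA N Ws Ps fuel n cur memo res).2.map (·.1)) := by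
  intro fuel
  induction fuel with
  | zero =>
    intro n cur rest memo res
    rw [solMachB, solBtA]
    rw [contains_keys_eq]
    by_cases h1 : (memo.get? cur).isSome
    · simp only [h1, if_true]
    · simp only [Bool.not_eq_true] at h1
      simp only [h1, Bool.false_eq_true, if_false]
      by_cases h2 : n = N
      · simp only [h2, if_true]
        by_cases h3 : cur.2.1 ≤ cur.2.2 <;> simp [h3]
      · simp only [h2, if_false]
  | succ f ih =>
    intro n cur rest memo res
    rw [solMachB, solBtA]
    rw [contains_keys_eq]
    by_cases h1 : (memo.get? cur).isSome
    · simp only [h1, if_true]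
    · simp only [Bool.not_eq_true] at h1
      simp only [h1, Bool.false_eq_true, if_false]
      by_cases h2 : n = N
      · simp only [h2, if_true]
        by_cases h3 : cur.2.1 ≤ cur.2.2 <;> simp [h3]
      · simp only [h2, if_false]
        rw [ih, ih]
        rw [solMachB]
        rw [keys_insert_eq_add]

theorem machine_run (N : Int) (Ws Ps : List Int) :
    solMachB N Ws Ps [.expand N.toNat 0 (0, 0, 0)] PySem.Set.empty [] =
      ((solBtA N Ws Ps N.toNat 0 (0, 0, 0) PySem.Dict.empty []).1.keys,
       (solBtA N Ws Ps N.toNat 0 (0, 0, 0) PySem.Dict.empty []).2.map (·.1)) := by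
  have h0 : (PySem.Dict.empty : PySem.Dict (Int × Int × Int) (List (Int × Int × Int))).keys =
      PySem.Set.empty := by
    simp [PySem.Dict.keys_empty, PySem.Set.empty]
  have h := sim_lemma N Ws Ps N.toNat 0 (0, 0, 0) []
    (PySem.Dict.empty) []
  rw [h0] at h
  simpa [solMachB] using h

-- the final argmax loop of A: for nonempty xs it returns the maximum of the first components
theorem argmax_loop (xs : List (Int × Int × Int)) (hne : xs ≠ []) :
    ((xs.getD ((List.range xs.length).foldl
        (fun ansIdx i => if (xs.getD i (0, 0, 0)).1 > (xs.getD ansIdx (0, 0, 0)).1 then i else ansIdx) 0)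
      (0, 0, 0)).1 ∈ xs.map (fun s => s.1)) ∧
    (∀ s ∈ xs, s.1 ≤ (xs.getD ((List.range xs.length).foldl
        (fun ansIdx i => if (xs.getD i (0, 0, 0)).1 > (xs.getD ansIdx (0, 0, 0)).1 then i else ansIdx) 0)
      (0, 0, 0)).1) := by
  have hlen : 0 < xs.length := List.length_pos_iff.mpr hne
  have key : ∀ (m : Nat), m ≤ xs.length → ∀ (a : Nat), a < xs.length →
      ((List.range m).foldl
          (fun ansIdx i => if (xs.getD i (0, 0, 0)).1 > (xs.getD ansIdx (0, 0, 0)).1 then i else ansIdx) a)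
        < xs.length ∧
      (xs.getD a (0, 0, 0)).1 ≤ (xs.getD ((List.range m).foldl
          (fun ansIdx i => if (xs.getD i (0, 0, 0)).1 > (xs.getD ansIdx (0, 0, 0)).1 then i else ansIdx) a)
        (0, 0, 0)).1 ∧
      ∀ i < m, (xs.getD i (0, 0, 0)).1 ≤ (xs.getD ((List.range m).foldl
          (fun ansIdx i => if (xs.getD i (0, 0, 0)).1 > (xs.getD ansIdx (0, 0, 0)).1 then i else ansIdx) a)
        (0, 0, 0)).1 := by
    intro m
    induction m with
    | zero => intro _ a ha; exact ⟨ha, le_refl _, fun i hi => absurd hi (by omega)⟩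
    | succ m ih =>
      intro hm a ha
      obtain ⟨hj, hja, hjall⟩ := ih (by omega) a ha
      rw [List.range_succ, List.foldl_append, List.foldl_cons, List.foldl_nil]
      set j := (List.range m).foldl
          (fun ansIdx i => if (xs.getD i (0, 0, 0)).1 > (xs.getD ansIdx (0, 0, 0)).1 then i else ansIdx) a with hjdef
      by_cases hc : (xs.getD m (0, 0, 0)).1 > (xs.getD j (0, 0, 0)).1
      · rw [if_pos hc]
        refine ⟨by omega, le_trans hja (le_of_lt hc), fun i hi => ?_⟩
        rcases Nat.lt_succ_iff_lt_or_eq.mp hi with h | h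
        · exact le_trans (hjall i h) (le_of_lt hc)
        · subst h; exact le_refl _
      · rw [if_neg hc]
        refine ⟨hj, hja, fun i hi => ?_⟩
        rcases Nat.lt_succ_iff_lt_or_eq.mp hi with h | h
        · exact hjall i h
        · subst h; omega
  obtain ⟨hj, -, hjall⟩ := key xs.length (le_refl _) 0 hlen
  constructor
  · refine List.mem_map.mpr ⟨_, ?_, rfl⟩
    rw [List.getD_eq_getElem _ _ hj]
    exact List.getElem_mem _
  · intro s hs
    obtain ⟨i, hi, rfl⟩ := List.mem_iff_getElem.mp hs
    have := hjall i hi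
    rw [List.getD_eq_getElem _ _ hi] at this
    exact this

-- ===== VERDICT (by name: the statement is the Claim_ definition above) =====
theorem solution_spec : Claim_equal_solution := by
  intro N Ws Ps _ _
  unfold Spec_solution
  have hB : solution_alt N Ws Ps =
      (PySem.List.max?
        ((solBtA N Ws Ps N.toNat 0 (0, 0, 0) PySem.Dict.empty []).2.map (fun s => s.1))
        (fun x => x)).getD 0 := by
    simp only [solution_alt]
    rw [machine_run]
  by_cases hne : (solBtA N Ws Ps N.toNat 0 (0, 0, 0) PySem.Dict.empty []).2 = []
  · -- no result survives: A's port reads the default triple (0,0,0), B's port max? is none;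
    -- both yield 0 (in Python both raise here, outside Pre_)
    rw [hB, hne]
    have hnone : PySem.List.max? (([] : List (Int × Int × Int)).map (fun s => s.1))
        (fun x : Int => x) = none := (PySem.List.max?_eq_none_iff _ _).mpr (by simp)
    rw [hnone]
    simp [solution, hne]
  obtain ⟨hmem, hmax⟩ := argmax_loop _ hne
  have hmapne : (solBtA N Ws Ps N.toNat 0 (0, 0, 0) PySem.Dict.empty []).2.map
      (fun s : Int × Int × Int => s.1) ≠ [] := by
    intro h; exact hne (List.map_eq_nil_iff.mp h)
  cases hm : PySem.List.max?
      ((solBtA N Ws Ps N.toNat 0 (0, 0, 0) PySem.Dict.empty []).2.map (fun s => s.1))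
      (fun x => x) with
  | none => exact absurd ((PySem.List.max?_eq_none_iff _ _).mp hm) hmapne
  | some m =>
    have hmmem : m ∈ (solBtA N Ws Ps N.toNat 0 (0, 0, 0) PySem.Dict.empty []).2.map
        (fun s => s.1) := PySem.List.max?_mem hm
    have hmmax := PySem.List.max?_isMax hm
    have h1 := hmmax _ hmem
    obtain ⟨s, hs, hsm⟩ := List.mem_map.mp hmmem
    have h2 := hmax s hs
    rw [hB, hm]
    simp only [Option.getD_some, solution]
    omega
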